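-- pv_equiv track=rewrite | github.com/torbenpfohl/db | src/database_builder.py | _next_partial_city
-- ===== SOURCE A (Python) =====
-- import string
--
-- def _next_partial_city(last_partial_city: str) -> str:
--   """Determine next letter-sequence used as input for bahn-api."""
--   # TODO: write a test for this function
--   letters = string.ascii_lowercase + " _"
--   if last_partial_city == "":
--     return letters[0]
--   next_partial_city = ""
--   flag = 0
--   last_partial_city_reversed = "".join([i for i in reversed(last_partial_city)])
--   for index, letter in enumerate(last_partial_city_reversed):
--     if letter == letters[-1]:
--       next_partial_city += letters[0]
--       flag = 1
--     else:
--       next_partial_city += letters[letters.find(letter) + 1] + last_partial_city_reversed[index+1:]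
--       flag = 0
--       break
--   if flag == 1:
--     next_partial_city = letters[0] + next_partial_city
--   next_partial_city = "".join([i for i in reversed(next_partial_city)])
--   return next_partial_city
-- ===== SOURCE B (Python) =====
-- import string
--
-- def _next_partial_city(last_partial_city: str) -> str:
--   """Determine next letter-sequence used as input for bahn-api."""
--   letters = string.ascii_lowercase + " _"
--   if last_partial_city == "":
--     return "a"
--   head = last_partial_city.rstrip("_")          # drop the trailing run of '_' (they carry over)
--   if head == "":                                # all '_': wrap and grow by one digit
--     return "a" * (len(last_partial_city) + 1)
--   return head[:-1] + letters[letters.find(head[-1]) + 1] + "a" * (len(last_partial_city) - len(head))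
-- ===== Notes on version B (the rewrite author's own statement) =====
-- stated objective: simpler
-- what changed: Replaces the reversed per-character carry loop with flag and double string reversal by rstrip of the trailing '_' run plus a single-character increment and 'a'-padding.
import Mathlib
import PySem

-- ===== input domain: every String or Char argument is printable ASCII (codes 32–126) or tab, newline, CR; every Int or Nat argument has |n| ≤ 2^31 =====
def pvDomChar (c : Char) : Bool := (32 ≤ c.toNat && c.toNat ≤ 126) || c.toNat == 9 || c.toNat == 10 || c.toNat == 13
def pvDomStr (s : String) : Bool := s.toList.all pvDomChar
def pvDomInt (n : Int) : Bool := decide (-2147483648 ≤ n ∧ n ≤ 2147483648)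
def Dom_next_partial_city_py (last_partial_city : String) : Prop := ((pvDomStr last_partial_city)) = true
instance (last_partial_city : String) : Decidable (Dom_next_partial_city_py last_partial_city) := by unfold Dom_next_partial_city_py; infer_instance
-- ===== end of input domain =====

-- B replaces A's reversed per-character carry loop (with flag and double reversal) by
-- stripping the trailing run of '_' and incrementing one character: simpler, no loop over carries.

-- letters = string.ascii_lowercase + " _"
def pvLetters : List Char := "abcdefghijklmnopqrstuvwxyz _".toList

-- letters.find(c): index of first occurrence, -1 if absent (exact hand port of str.find for a 1-char needle)
def pvFind (c : Char) : Int :=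
  match pvLetters.findIdx? (· == c) with
  | some i => (i : Int)
  | none => -1

-- letters[letters.find(c) + 1]; the index is always in range here (c ≠ '_' at every call site)
def pvInc (c : Char) : Char := (PySem.List.pyGet? pvLetters (pvFind c + 1)).getD 'a'

-- ===== PORT A =====
-- the for-loop over the reversed string: state = (accumulated next_partial_city, flag); break = return
def pvALoop : List Char → List Char → Nat → List Char × Nat
  | [], acc, flag => (acc, flag)
  | c :: rest, acc, _ =>
    if c == '_' then pvALoop rest (acc ++ ['a']) 1
    else (acc ++ [pvInc c] ++ rest, 0)

def next_partial_city_py (last_partial_city : String) : String :=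
  if last_partial_city == "" then "a"
  else
    let rev := last_partial_city.toList.reverse
    let (npc, flag) := pvALoop rev [] 0
    let npc := if flag == 1 then 'a' :: npc else npc
    String.ofList npc.reverse

-- ===== PORT B =====
def next_partial_city_py_alt (last_partial_city : String) : String :=
  if last_partial_city == "" then "a"
  else
    let l := last_partial_city.toList
    -- head = last_partial_city.rstrip("_") (exact hand port of rstrip with an explicit char set)
    let head := (l.reverse.dropWhile (· == '_')).reverse
    if head == [] then String.ofList (List.replicate (l.length + 1) 'a')
    else String.ofList (head.dropLast ++ [pvInc ((head.getLast?).getD 'a')] ++ List.replicate (l.length - head.length) 'a')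

-- ===== PRECONDITION & SPEC =====
def Spec_next_partial_city_py (last_partial_city : String) (out : String) : Prop := out = next_partial_city_py_alt last_partial_city
instance (last_partial_city : String) (out : String) : Decidable (Spec_next_partial_city_py last_partial_city out) := by unfold Spec_next_partial_city_py; infer_instance

-- ===== CLAIM (what is proved, stated in full; the proofs are below) =====
def Claim_equal_next_partial_city_py : Prop := ∀ (last_partial_city : String), Dom_next_partial_city_py last_partial_city → Spec_next_partial_city_py last_partial_city (next_partial_city_py last_partial_city)

-- ===== LEMMAS AND PROOFS =====

-- A's loop, characterised by the split of the reversed input at the first non-'_' character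
theorem pvALoop_spec (rev acc : List Char) (flag : Nat) :
    pvALoop rev acc flag =
      match rev.dropWhile (· == '_') with
      | [] => (acc ++ List.replicate rev.length 'a', if rev = [] then flag else 1)
      | c :: rest => (acc ++ List.replicate (rev.takeWhile (· == '_')).length 'a' ++ [pvInc c] ++ rest, 0) := by
  induction rev generalizing acc flag with
  | nil => simp [pvALoop]
  | cons c rest ih =>
    by_cases h : c = '_'
    · subst h
      simp only [pvALoop, List.dropWhile, List.takeWhile]
      rw [ih]
      cases hd : rest.dropWhile (· == '_') with
      | nil => simp [List.replicate_succ, List.append_assoc, ite_self]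
      | cons d ds => simp [List.replicate_succ, List.append_assoc]
    · simp [pvALoop, h]

theorem next_partial_city_py_eq (s : String) :
    next_partial_city_py s = next_partial_city_py_alt s := by
  by_cases hs : s = ""
  · simp [next_partial_city_py, next_partial_city_py_alt, hs]
  · have hl : s.toList ≠ [] := by
      intro h
      apply hs
      have := congrArg String.ofList h
      simpa using this
    simp only [next_partial_city_py, next_partial_city_py_alt, beq_iff_eq, if_neg hs]
    rw [pvALoop_spec]
    set l := s.toList with hldef
    have hrev : l.reverse ≠ [] := by simpa using hl
    cases hd : l.reverse.dropWhile (· == '_') with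
    | nil =>
      -- all characters are '_': A prepends 'a' (flag = 1) and reverses; B returns 'a'^(n+1)
      simp [hrev, List.reverse_replicate, List.replicate_succ, ← List.replicate_succ']
    | cons c rest =>
      -- the first non-'_' from the right is incremented, trailing '_' run becomes 'a's
      have hsplit : l.reverse = l.reverse.takeWhile (· == '_') ++ (c :: rest) := by
        conv_lhs => rw [← List.takeWhile_append_dropWhile (p := (· == '_')) (l := l.reverse)]
        rw [hd]
      have hlen : l.length - (rest.length + 1) = (l.reverse.takeWhile (· == '_')).length := by
        have hle : l.length = (l.reverse.takeWhile (· == '_')).length + (rest.length + 1) := by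
          have := congrArg List.length hsplit
          simpa [List.length_reverse] using this
        omega
      simp [List.reverse_append, List.reverse_replicate, List.dropLast_append_of_ne_nil,
        List.getLast?_append, hlen, List.append_assoc]

-- ===== VERDICT (by name: the statement is the Claim_ definition above) =====
theorem next_partial_city_py_spec : Claim_equal_next_partial_city_py := by
  intro s _
  exact next_partial_city_py_eq s
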